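-- pv_equiv track=rewrite | github.com/ioaksenenko/neural_networks | identifier/datamaker/type_3/main.py | number_input_question_generate
-- ===== SOURCE A (Python) =====
-- def number_input_question_generate(n=1, m=1):
--     inputs = []
--     outputs = []
--     input = '<p>T</p>'
--     for i in range(n):
--         input += '<p><b><u>T</u></b></p>' + '<p>T</p>'
--     inputs.append(input)
--     outputs.append([0, 0, 0, 1, 0, 0, 0])
--     inputs.append(input[0:len(input) - 8])
--     outputs.append([0, 0, 0, 1, 0, 0, 0])
--     return inputs, outputs
-- ===== SOURCE B (Python) =====
-- def number_input_question_generate(n=1, m=1):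
--     p = '<p>T</p>'
--     b = '<p><b><u>T</u></b></p>'
--     k = max(n, 0)
--     label = [0, 0, 0, 1, 0, 0, 0]
--     return [b.join([p] * (k + 1)), (p + b) * k], [label, label[:]]
-- ===== Notes on version B (the rewrite author's own statement) =====
-- stated objective: alternative
-- what changed: Instead of accumulating by repeated concatenation and slicing off the last 8 chars, B builds the full string as a separator-join of k+1 '<p>T</p>' pieces and constructs the truncated string independently as ('<p>T</p>'+'<p><b><u>T</u></b></p>')*k, with no slice at all.
import Mathlib
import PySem

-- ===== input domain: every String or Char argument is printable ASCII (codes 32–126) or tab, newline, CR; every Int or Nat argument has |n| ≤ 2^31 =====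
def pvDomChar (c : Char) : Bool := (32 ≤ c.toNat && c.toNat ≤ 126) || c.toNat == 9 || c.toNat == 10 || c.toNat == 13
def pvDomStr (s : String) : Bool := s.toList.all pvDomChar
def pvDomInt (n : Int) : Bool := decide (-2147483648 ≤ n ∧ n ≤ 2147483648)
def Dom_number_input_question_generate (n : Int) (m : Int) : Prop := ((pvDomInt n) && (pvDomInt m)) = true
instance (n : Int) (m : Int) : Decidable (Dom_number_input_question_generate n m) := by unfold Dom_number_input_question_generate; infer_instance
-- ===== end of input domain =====

-- B builds the full string as a separator-join of k+1 '<p>T</p>' pieces and the truncated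
-- string independently as (piece+separator)*k, replacing A's accumulating loop and len-8 slice.


-- ===== PORT A =====
-- strings are ported as List Char (PySem convention); String.ofList converts back at the end
def number_input_question_generate (n : Int) (m : Int) : List String × List (List Int) :=
  let input : List Char :=
    (PySem.List.pyRange 0 n 1).foldl
      (fun s _ => s ++ ("<p><b><u>T</u></b></p>".toList ++ "<p>T</p>".toList))
      "<p>T</p>".toList
  let inputs : List String :=
    [String.ofList input,
     String.ofList (PySem.List.slice input (some 0) (some ((input.length : Int) - 8)))]
  let outputs : List (List Int) := [[0, 0, 0, 1, 0, 0, 0], [0, 0, 0, 1, 0, 0, 0]]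
  (inputs, outputs)

-- ===== PORT B =====
def number_input_question_generate_alt (n : Int) (m : Int) : List String × List (List Int) :=
  let p : List Char := "<p>T</p>".toList
  let b : List Char := "<p><b><u>T</u></b></p>".toList
  let k : Int := max n 0
  let label : List Int := [0, 0, 0, 1, 0, 0, 0]
  ([String.ofList (List.intercalate b (PySem.List.pyRepeat [p] (k + 1))),
    String.ofList (PySem.List.pyRepeat (p ++ b) k)],
   [label, label])

-- ===== PRECONDITION & SPEC =====
def Spec_number_input_question_generate (n : Int) (m : Int) (out : List String × List (List Int)) : Prop := out = number_input_question_generate_alt n m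
instance (n : Int) (m : Int) (out : List String × List (List Int)) : Decidable (Spec_number_input_question_generate n m out) := by unfold Spec_number_input_question_generate; infer_instance

-- ===== CLAIM (what is proved, stated in full; the proofs are below) =====
def Claim_equal_number_input_question_generate : Prop := ∀ (n : Int) (m : Int), Dom_number_input_question_generate n m → Spec_number_input_question_generate n m (number_input_question_generate n m)

-- ===== LEMMAS AND PROOFS =====
theorem flatMap_const_eq_flatten_replicate {α β : Type} (l : List β) (u : List α) :
    l.flatMap (fun _ => u) = (List.replicate l.length u).flatten := by
  induction l with
  | nil => rfl
  | cons x t ih => simp [List.flatMap_cons, ih, List.replicate_succ]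

theorem loop_eq_flatten (n : Int) (init u : List Char) :
    (PySem.List.pyRange 0 n 1).foldl (fun s _ => s ++ u) init
      = init ++ (List.replicate n.toNat u).flatten := by
  rw [PySem.List.foldl_append_eq_flatMap (g := fun _ : Int => u)]
  rw [flatMap_const_eq_flatten_replicate, PySem.List.length_pyRange_one]
  simp

theorem inter_aux (b : List Char) (l : List (List Char)) (p : List Char) :
    List.intercalate b (p :: l) = p ++ (l.map (fun q => b ++ q)).flatten := by
  induction l generalizing p with
  | nil => simp [List.intercalate]
  | cons q t ih => simp [List.intercalate, List.intersperse] at *; simp [ih q]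

theorem intercalate_replicate_succ (b p : List Char) (K : Nat) :
    List.intercalate b (List.replicate (K + 1) p)
      = p ++ (List.replicate K (b ++ p)).flatten := by
  rw [List.replicate_succ, inter_aux, List.map_replicate]

theorem shift_flatten (p b : List Char) (K : Nat) :
    p ++ (List.replicate K (b ++ p)).flatten
      = (List.replicate K (p ++ b)).flatten ++ p := by
  induction K with
  | zero => simp
  | succ k ih =>
      simp only [List.replicate_succ, List.flatten_cons, List.append_assoc]
      rw [ih]

theorem pyRepeat_eq_flatten (u : List Char) (n : Int) :
    PySem.List.pyRepeat u n = (List.replicate n.toNat u).flatten := by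
  simp [PySem.List.pyRepeat]

-- ===== VERDICT (by name: the statement is the Claim_ definition above) =====
theorem number_input_question_generate_spec : Claim_equal_number_input_question_generate := by
  intro n m _
  unfold Spec_number_input_question_generate number_input_question_generate number_input_question_generate_alt
  dsimp only
  rw [loop_eq_flatten, PySem.List.pyRepeat_singleton]
  have hk1 : (max n 0 + 1).toNat = n.toNat + 1 := by omega
  have hk : (max n 0).toNat = n.toNat := by omega
  rw [hk1, intercalate_replicate_succ, pyRepeat_eq_flatten, hk]
  set p : List Char := "<p>T</p>".toList with hp
  set b : List Char := "<p><b><u>T</u></b></p>".toList with hb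
  set K := n.toNat with hK
  have hlen : ((p ++ (List.replicate K (b ++ p)).flatten).length : Int) - 8
      = ((30 * K : Nat) : Int) := by
    simp [hp, hb, List.length_flatten]
    ring
  have hfl : ((List.replicate K (p ++ b)).flatten).length = 30 * K := by
    simp [hp, hb, List.length_flatten]
    ring
  rw [hlen, PySem.List.slice_zero_start, PySem.List.slice_to_natCast,
      shift_flatten, List.take_left' hfl]
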